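-- pv_equiv track=rewrite | github.com/arko-14/desysflow-oss | agents/report_generator.py | _component_type
-- ===== SOURCE A (Python) =====
-- def _component_type(name: str) -> str:
--     low = name.lower()
--     if any(token in low for token in ["gateway", "alb", "nginx", "ingress", "edge"]):
--         return "gateway"
--     if any(token in low for token in ["postgres", "mysql", "mongo", "db", "database", "dynamo", "cassandra"]):
--         return "database"
--     if any(token in low for token in ["redis", "cache", "memcached"]):
--         return "cache"
--     if any(token in low for token in ["kafka", "queue", "stream", "sqs", "pubsub", "rabbitmq"]):
--         return "queue"
--     if any(token in low for token in ["s3", "blob", "gcs", "storage"]):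
--         return "storage"
--     if any(token in low for token in ["cdn", "cloudfront"]):
--         return "cdn"
--     if any(token in low for token in ["monitor", "metric", "logging", "trace", "alert", "observ"]):
--         return "monitoring"
--     return "service"
-- ===== SOURCE B (Python) =====
-- _TYPES = ["gateway", "database", "cache", "queue", "storage", "cdn", "monitoring"]
--
-- # one flat priority-ranked keyword list: (rank, token)
-- _RANKED = [
--     (0, "gateway"), (0, "alb"), (0, "nginx"), (0, "ingress"), (0, "edge"),
--     (1, "postgres"), (1, "mysql"), (1, "mongo"), (1, "db"), (1, "database"),
--     (1, "dynamo"), (1, "cassandra"),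
--     (2, "redis"), (2, "cache"), (2, "memcached"),
--     (3, "kafka"), (3, "queue"), (3, "stream"), (3, "sqs"), (3, "pubsub"),
--     (3, "rabbitmq"),
--     (4, "s3"), (4, "blob"), (4, "gcs"), (4, "storage"),
--     (5, "cdn"), (5, "cloudfront"),
--     (6, "monitor"), (6, "metric"), (6, "logging"), (6, "trace"), (6, "alert"),
--     (6, "observ"),
-- ]
--
-- def _component_type(name: str) -> str:
--     low = name.lower()
--     best = min((rank for rank, token in _RANKED if token in low), default=len(_TYPES))
--     return _TYPES[best] if best < len(_TYPES) else "service"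
-- ===== Notes on version B (the rewrite author's own statement) =====
-- stated objective: alternative
-- what changed: Instead of seven ordered early-return branches, B keeps one flat (rank, token) list, aggregates ALL matching tokens with min() over their ranks, and indexes a type-name table with the best rank (default 'service'); correct because ranks follow A's branch order, so the minimum matched rank is the first branch that would fire.
import Mathlib
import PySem

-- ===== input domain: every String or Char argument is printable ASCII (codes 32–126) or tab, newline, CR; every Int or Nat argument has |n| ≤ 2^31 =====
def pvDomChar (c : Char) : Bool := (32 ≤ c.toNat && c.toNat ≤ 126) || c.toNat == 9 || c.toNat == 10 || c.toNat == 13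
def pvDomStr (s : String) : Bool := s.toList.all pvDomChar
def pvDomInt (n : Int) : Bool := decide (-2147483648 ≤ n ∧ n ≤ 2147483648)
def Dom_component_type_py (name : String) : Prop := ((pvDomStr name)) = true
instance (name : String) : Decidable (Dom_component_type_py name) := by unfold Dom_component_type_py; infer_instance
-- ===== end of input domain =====

-- B replaces A's seven ordered early-return branches by a flat ranked token list, min() over the ranks of all matching tokens, and a table lookup (alternative decomposition, same cost).


-- ===== PORT A =====
def component_type_py (name : String) : String :=
  let low := PySem.Str.lower name
  if (["gateway", "alb", "nginx", "ingress", "edge"].any (fun token => PySem.Str.isIn token low)) then "gateway"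
  else if (["postgres", "mysql", "mongo", "db", "database", "dynamo", "cassandra"].any (fun token => PySem.Str.isIn token low)) then "database"
  else if (["redis", "cache", "memcached"].any (fun token => PySem.Str.isIn token low)) then "cache"
  else if (["kafka", "queue", "stream", "sqs", "pubsub", "rabbitmq"].any (fun token => PySem.Str.isIn token low)) then "queue"
  else if (["s3", "blob", "gcs", "storage"].any (fun token => PySem.Str.isIn token low)) then "storage"
  else if (["cdn", "cloudfront"].any (fun token => PySem.Str.isIn token low)) then "cdn"
  else if (["monitor", "metric", "logging", "trace", "alert", "observ"].any (fun token => PySem.Str.isIn token low)) then "monitoring"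
  else "service"

-- ===== PORT B =====
def ctypeNames : List String :=
  ["gateway", "database", "cache", "queue", "storage", "cdn", "monitoring"]

def ctypeRanked : List (Int × String) :=
  [(0, "gateway"), (0, "alb"), (0, "nginx"), (0, "ingress"), (0, "edge"),
   (1, "postgres"), (1, "mysql"), (1, "mongo"), (1, "db"), (1, "database"),
   (1, "dynamo"), (1, "cassandra"),
   (2, "redis"), (2, "cache"), (2, "memcached"),
   (3, "kafka"), (3, "queue"), (3, "stream"), (3, "sqs"), (3, "pubsub"),
   (3, "rabbitmq"),
   (4, "s3"), (4, "blob"), (4, "gcs"), (4, "storage"),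
   (5, "cdn"), (5, "cloudfront"),
   (6, "monitor"), (6, "metric"), (6, "logging"), (6, "trace"), (6, "alert"),
   (6, "observ")]

-- min(generator, default=7) ported as PySem.List.min? on the matching ranks, defaulted;
-- _TYPES[best] with 0 ≤ best < 7 never raises, so pyGet? is defaulted only for the impossible none case.
def component_type_py_alt (name : String) : String :=
  let low := PySem.Str.lower name
  let best := (PySem.List.min?
      ((ctypeRanked.filter (fun p => PySem.Str.isIn p.2 low)).map Prod.fst)
      (fun x => x)).getD 7
  if best < 7 then (PySem.List.pyGet? ctypeNames best).getD "service" else "service"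

-- ===== PRECONDITION & SPEC =====
def Spec_component_type_py (name : String) (out : String) : Prop := out = component_type_py_alt name
instance (name : String) (out : String) : Decidable (Spec_component_type_py name out) := by unfold Spec_component_type_py; infer_instance

-- ===== CLAIM (what is proved, stated in full; the proofs are below) =====
def Claim_equal_component_type_py : Prop := ∀ (name : String), Dom_component_type_py name → Spec_component_type_py name (component_type_py name)

-- ===== LEMMAS AND PROOFS =====

theorem foldl_min_id_eq (r : Int) (l : List Int) (h : ∀ x ∈ l, r ≤ x) :
    l.foldl min r = r := by
  induction l with
  | nil => rfl
  | cons a t ih =>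
    simp only [List.foldl_cons]
    rw [min_eq_left (h a (by simp))]
    exact ih (fun x hx => h x (by simp [hx]))

-- one ranked group peeled off: min over (group ++ rest) = the group's rank if any of
-- its tokens matches, else min over rest
theorem minGroup (low : String) (r : Int) (toks : List String)
    (rest : List (Int × String)) (h : ∀ p ∈ rest, r ≤ p.1) :
    PySem.List.min?
      ((((toks.map (fun t => (r, t))) ++ rest).filter
          (fun p => PySem.Str.isIn p.2 low)).map Prod.fst) (fun x => x)
    = if toks.any (fun t => PySem.Str.isIn t low) then some r
      else PySem.List.min?
        ((rest.filter (fun p => PySem.Str.isIn p.2 low)).map Prod.fst) (fun x => x) := by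
  induction toks with
  | nil => simp
  | cons t ts ih =>
    by_cases hf : PySem.Str.isIn t low = true
    · simp only [List.map_cons, List.cons_append, List.filter_cons, hf, if_true,
        List.any_cons, Bool.true_or, List.map_cons]
      rw [PySem.List.min?_id_cons]
      congr 1
      apply foldl_min_id_eq
      intro x hx
      simp only [List.mem_map, List.mem_filter, List.mem_append, List.mem_map] at hx
      obtain ⟨p, ⟨hp | hp, _⟩, rfl⟩ := hx
      · obtain ⟨t', _, rfl⟩ := hp; exact le_refl r
      · exact h p hp
    · simp only [List.map_cons, List.cons_append, List.filter_cons, hf,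
        List.any_cons, Bool.false_or]
      exact ih

-- ===== VERDICT (by name: the statement is the Claim_ definition above) =====
theorem component_type_py_spec : Claim_equal_component_type_py := by
  intro name _
  simp only [Spec_component_type_py, component_type_py, component_type_py_alt]
  generalize PySem.Str.lower name = low
  rw [show ctypeRanked
      = (["gateway", "alb", "nginx", "ingress", "edge"].map (fun t => ((0:Int), t)))
        ++ ((["postgres", "mysql", "mongo", "db", "database", "dynamo", "cassandra"].map (fun t => ((1:Int), t)))
        ++ ((["redis", "cache", "memcached"].map (fun t => ((2:Int), t)))
        ++ ((["kafka", "queue", "stream", "sqs", "pubsub", "rabbitmq"].map (fun t => ((3:Int), t)))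
        ++ ((["s3", "blob", "gcs", "storage"].map (fun t => ((4:Int), t)))
        ++ ((["cdn", "cloudfront"].map (fun t => ((5:Int), t)))
        ++ ((["monitor", "metric", "logging", "trace", "alert", "observ"].map (fun t => ((6:Int), t)))
        ++ ([])))))))
    from rfl]
  rw [minGroup low 0 ["gateway", "alb", "nginx", "ingress", "edge"] _ (by decide)]
  rw [minGroup low 1 ["postgres", "mysql", "mongo", "db", "database", "dynamo", "cassandra"] _ (by decide)]
  rw [minGroup low 2 ["redis", "cache", "memcached"] _ (by decide)]
  rw [minGroup low 3 ["kafka", "queue", "stream", "sqs", "pubsub", "rabbitmq"] _ (by decide)]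
  rw [minGroup low 4 ["s3", "blob", "gcs", "storage"] _ (by decide)]
  rw [minGroup low 5 ["cdn", "cloudfront"] _ (by decide)]
  rw [minGroup low 6 ["monitor", "metric", "logging", "trace", "alert", "observ"] [] (by decide)]
  split_ifs <;> simp_all <;> decide
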